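-- pv_equiv track=rewrite | github.com/zaemon1251-hesty/Atcoder_codes | AtCoder/abc/abc268/f.py | cnt
-- ===== SOURCE A (Python) =====
-- def cnt(s):
--     x, y, po = 0, 0, 0
--     for si in s:
--         if si == "X":
--             x += 1
--         else:
--             y += int(si)
--             po += x * int(si)
--     return (x, y, po)
-- ===== SOURCE B (Python) =====
-- def cnt(s):
--     parts = s.split("X")
--     sums = [sum(int(ch) for ch in part) for part in parts]
--     x = len(parts) - 1
--     y = sum(sums)
--     po = sum(i * t for i, t in enumerate(sums))
--     return (x, y, po)
-- ===== Notes on version B (the rewrite author's own statement) =====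
-- stated objective: alternative
-- what changed: B splits the string on 'X' into segments and works over the list of per-segment digit sums (x = segments-1, y = total of the sums, po = sum of i*segment_sum over enumerate), instead of A's single character loop carrying three running accumulators.
import Mathlib
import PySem

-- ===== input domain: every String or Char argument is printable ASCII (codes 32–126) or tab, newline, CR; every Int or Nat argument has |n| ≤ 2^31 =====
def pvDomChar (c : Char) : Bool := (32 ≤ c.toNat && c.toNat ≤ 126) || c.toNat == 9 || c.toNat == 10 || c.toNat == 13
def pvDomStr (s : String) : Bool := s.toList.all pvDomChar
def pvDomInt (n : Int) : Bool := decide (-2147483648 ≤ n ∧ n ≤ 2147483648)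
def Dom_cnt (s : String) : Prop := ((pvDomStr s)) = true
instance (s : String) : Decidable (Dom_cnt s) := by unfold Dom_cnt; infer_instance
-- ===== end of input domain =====

-- B splits the string on 'X' into segments and combines the per-segment digit sums
-- (x = segments-1, y = their total, po = Σ i·sum_i), instead of A's single character
-- loop with three running accumulators; objective: alternative decomposition, same cost.

-- ===== PORT A =====
-- forward fold over the characters; state (x, y, po) as in A
def cnt (s : String) : Int × Int × Int :=
  s.toList.foldl
    (fun (st : Int × Int × Int) si =>
      let (x, y, po) := st
      if si = 'X' then (x + 1, y, po)
      else
        -- int(si); Pre_cnt excludes the ValueError case (none), so getD 0 is never the raising branch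
        let d := (PySem.Int.ofStr? (String.singleton si)).getD 0
        (x, y + d, po + x * d))
    (0, 0, 0)

-- ===== PORT B =====
-- parts = s.split("X"); sums = per-part digit sums; then three aggregates over sums.
-- split? is some for the nonempty separator "X", so getD [] never takes the default.
def cnt_alt (s : String) : Int × Int × Int :=
  let parts := (PySem.Str.split? s "X").getD []
  let sums := parts.map
    (fun part => (part.toList.map
      (fun ch => (PySem.Int.ofStr? (String.singleton ch)).getD 0)).sum)
  ((parts.length : Int) - 1,
   sums.sum,
   ((PySem.List.enumerate sums).map (fun it => it.1 * it.2)).sum)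

-- ===== PRECONDITION & SPEC =====
-- A raises ValueError (int(si)) whenever a character is neither 'X' nor a decimal digit; exactly those inputs are excluded.
def Pre_cnt (s : String) : Prop := (s.toList.all (fun c => c == 'X' || c.isDigit)) = true
instance (s : String) : Decidable (Pre_cnt s) := by unfold Pre_cnt; infer_instance
def pvWitness_cnt : String := "X12X3"
def Spec_cnt (s : String) (out : Int × Int × Int) : Prop := out = cnt_alt s
instance (s : String) (out : Int × Int × Int) : Decidable (Spec_cnt s out) := by unfold Spec_cnt; infer_instance

-- ===== CLAIM (what is proved, stated in full; the proofs are below) =====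
def Claim_equal_cnt : Prop := ∀ (s : String), Dom_cnt s → Pre_cnt s → Spec_cnt s (cnt s)

-- ===== LEMMAS AND PROOFS =====

-- digit value of a character (abbreviation used only by the proofs)
def pvD (c : Char) : Int := (PySem.Int.ofStr? (String.singleton c)).getD 0

-- the three totals, defined structurally on the character list
def pvX : List Char → Int
  | [] => 0
  | c :: l => (if c = 'X' then 1 else 0) + pvX l

def pvS : List Char → Int
  | [] => 0
  | c :: l => (if c = 'X' then 0 else pvD c) + pvS l

def pvP : List Char → Int
  | [] => 0
  | c :: l => (if c = 'X' then pvS l else 0) + pvP l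

-- simple structural characterisation of split-on-'X'
def pvSp : List Char → List (List Char)
  | [] => [[]]
  | c :: l => if c = 'X' then [] :: pvSp l else (pvSp l).modifyHead (c :: ·)

theorem pvSp_ne_nil (l : List Char) : pvSp l ≠ [] := by
  cases l with
  | nil => simp [pvSp]
  | cons c r =>
    simp only [pvSp]
    split
    · simp
    · cases h : pvSp r with
      | nil => exact absurd h (pvSp_ne_nil r)
      | cons a t => simp [List.modifyHead]

theorem pvSp_go (l : List Char) : ∀ fuel, l.length ≤ fuel → ∀ cur acc h t,
    pvSp l = h :: t →
    PySem.Chars.splitOn.go ['X'] fuel l cur acc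
      = acc.reverse ++ (cur.reverse ++ h) :: t := by
  induction l with
  | nil =>
    intro fuel _ cur acc h t hsp
    simp only [pvSp, List.cons.injEq] at hsp
    obtain ⟨rfl, rfl⟩ := hsp
    cases fuel <;> simp [PySem.Chars.splitOn.go]
  | cons c r ih =>
    intro fuel hf cur acc h t hsp
    cases fuel with
    | zero => simp at hf
    | succ f =>
      obtain ⟨h', t', hsp'⟩ := List.exists_cons_of_ne_nil (pvSp_ne_nil r)
      by_cases hc : c = 'X'
      · subst hc
        simp only [pvSp, reduceIte, hsp', List.cons.injEq] at hsp
        obtain ⟨rfl, rfl⟩ := hsp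
        have hpre : List.isPrefixOf ['X'] ('X' :: r) = true := by
          simp [List.isPrefixOf]
        simp only [PySem.Chars.splitOn.go, hpre, if_pos, List.length_nil,
          List.length_cons, List.drop_succ_cons, List.drop_zero]
        rw [ih f (by simp at hf; omega) [] (cur.reverse :: acc) h' t' hsp']
        simp
      · have hpre : List.isPrefixOf ['X'] (c :: r) = false := by
          simp [List.isPrefixOf]
          exact fun hh => hc hh.symm
        simp only [pvSp, if_neg hc, hsp', List.modifyHead, List.cons.injEq] at hsp
        obtain ⟨rfl, rfl⟩ := hsp
        simp only [PySem.Chars.splitOn.go, hpre, Bool.false_eq_true, if_false]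
        rw [ih f (by simp at hf; omega) (c :: cur) acc h' t' hsp']
        simp

theorem pvSp_eq (l : List Char) : PySem.Chars.splitOn l ['X'] = pvSp l := by
  obtain ⟨h, t, hsp⟩ := List.exists_cons_of_ne_nil (pvSp_ne_nil l)
  unfold PySem.Chars.splitOn
  rw [pvSp_go l (l.length + 1) (by omega) [] [] h t hsp]
  simp [hsp]

-- digit sum of a segment
def pvDsum (p : List Char) : Int := (p.map pvD).sum

-- weighted (enumerate) sum, with shift
def pvE (k : Int) (ts : List Int) : Int :=
  ((PySem.List.enumerate ts k).map (fun it => it.1 * it.2)).sum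

theorem pvE_cons (k : Int) (t : Int) (ts : List Int) :
    pvE k (t :: ts) = k * t + pvE (k + 1) ts := by
  simp only [pvE, PySem.List.enumerate, List.map_cons, List.sum_cons]

theorem pvE_shift (ts : List Int) : ∀ k, pvE k ts = k * ts.sum + pvE 0 ts := by
  induction ts with
  | nil => intro k; simp [pvE, PySem.List.enumerate]
  | cons t ts ih =>
    intro k
    rw [pvE_cons, pvE_cons, ih (k + 1), ih (0 + 1), List.sum_cons]
    ring

-- the B-side aggregates over pvSp equal the structural totals
theorem pvSp_agg (l : List Char) :
    ((pvSp l).length : Int) - 1 = pvX l ∧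
    ((pvSp l).map pvDsum).sum = pvS l ∧
    pvE 0 ((pvSp l).map pvDsum) = pvP l := by
  induction l with
  | nil => simp [pvSp, pvX, pvS, pvP, pvDsum, pvE, PySem.List.enumerate]
  | cons c r ih =>
    obtain ⟨h', t', hsp'⟩ := List.exists_cons_of_ne_nil (pvSp_ne_nil r)
    obtain ⟨ihx, ihy, ihp⟩ := ih
    by_cases hc : c = 'X'
    · subst hc
      refine ⟨?_, ?_, ?_⟩
      · simp only [pvSp, pvX, reduceIte, List.length_cons]
        push_cast
        omega
      · simp only [pvSp, pvS, reduceIte, List.map_cons, List.sum_cons, ihy]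
        simp [pvDsum]
      · simp only [pvSp, pvP, reduceIte, List.map_cons]
        rw [pvE_cons, pvE_shift _ (0 + 1), ihy, ihp]
        simp [pvDsum]
    · rw [hsp'] at ihx ihy ihp
      refine ⟨?_, ?_, ?_⟩
      · simp only [pvSp, if_neg hc, pvX, hsp', List.modifyHead,
          List.length_cons]
        simp only [List.length_cons] at ihx
        omega
      · simp only [pvSp, if_neg hc, pvS, hsp', List.modifyHead,
          List.map_cons, List.sum_cons, pvDsum, List.map_cons, List.sum_cons]
        simp only [List.map_cons, List.sum_cons, pvDsum] at ihy
        rw [← ihy]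
        ring
      · simp only [pvSp, if_neg hc, pvP, hsp', List.modifyHead,
          List.map_cons]
        simp only [List.map_cons] at ihp
        rw [pvE_cons] at ihp ⊢
        rw [← ihp]
        simp [pvDsum]

theorem cnt_foldA (l : List Char) (x y po : Int) :
    l.foldl
      (fun (st : Int × Int × Int) si =>
        let (x, y, po) := st
        if si = 'X' then (x + 1, y, po)
        else
          let d := (PySem.Int.ofStr? (String.singleton si)).getD 0
          (x, y + d, po + x * d))
      (x, y, po)
    = (x + pvX l, y + pvS l, po + x * pvS l + pvP l) := by
  induction l generalizing x y po with
  | nil => simp [pvX, pvS, pvP]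
  | cons c l ih =>
    by_cases h : c = 'X'
    · simp [List.foldl, h, ih, pvX, pvS, pvP]
      exact ⟨by ring, by ring⟩
    · simp [List.foldl, h, ih, pvX, pvS, pvP, pvD]
      exact ⟨by ring, by ring⟩

-- ===== VERDICT (by name: the statement is the Claim_ definition above) =====
theorem cnt_spec : Claim_equal_cnt := by
  intro s _ _
  unfold Spec_cnt cnt cnt_alt
  rw [cnt_foldA]
  simp only [PySem.Str.split?, PySem.Chars.split?,
    show ("X" : String).toList = ['X'] from rfl, pvSp_eq]
  simp only [show ((['X'] : List Char).isEmpty = true) = False by simp,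
    if_false, Option.map_some, Option.getD_some, List.map_map, List.length_map]
  have hfun : ((fun part : String =>
        (part.toList.map (fun ch => (PySem.Int.ofStr? (String.singleton ch)).getD 0)).sum)
      ∘ String.ofList) = pvDsum := by
    funext p
    rw [Function.comp_apply, String.toList_ofList]
    rfl
  rw [hfun]
  obtain ⟨hx, hy, hp⟩ := pvSp_agg s.toList
  rw [hx, hy, show ((PySem.List.enumerate ((pvSp s.toList).map pvDsum)).map
      (fun it => it.1 * it.2)).sum = pvE 0 ((pvSp s.toList).map pvDsum) from rfl, hp]
  simp
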